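-- pv_equiv track=rewrite | github.com/wboudy/orchestrator-state-machine | src/watcher/label_invariants.py | _ordered_labels
-- ===== SOURCE A (Python) =====
-- from typing import Iterable, List, Set
--
-- PRIMARY_STATE_LABELS = [
--     "needs:orchestrator",
--     "orchestrator:running",
--     "orchestrator:failed",
--     "orchestrator:done",
--     "orchestrator:dead",
-- ]
--
-- PRIMARY_STATE_SET = set(PRIMARY_STATE_LABELS)
--
-- HUMAN_LABEL = "needs:human"
--
-- def _ordered_labels(label_set: Set[str]) -> List[str]:
--     state_order = PRIMARY_STATE_LABELS + [HUMAN_LABEL]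
--     ordered: List[str] = []
--
--     for label in state_order:
--         if label in label_set:
--             ordered.append(label)
--
--     non_state = sorted(
--         label
--         for label in label_set
--         if label not in PRIMARY_STATE_SET and label != HUMAN_LABEL
--     )
--     ordered.extend(non_state)
--     return ordered
-- ===== SOURCE B (Python) =====
-- PRIMARY_STATE_LABELS = [
--     "needs:orchestrator",
--     "orchestrator:running",
--     "orchestrator:failed",
--     "orchestrator:done",
--     "orchestrator:dead",
-- ]
--
-- HUMAN_LABEL = "needs:human"
--
-- def _ordered_labels(label_set):
--     state_order = PRIMARY_STATE_LABELS + [HUMAN_LABEL]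
--     rank = {label: i for i, label in enumerate(state_order)}
--     return sorted(label_set, key=lambda label: (rank.get(label, len(state_order)), label))
-- ===== Notes on version B (the rewrite author's own statement) =====
-- stated objective: simpler
-- what changed: Replaces A's explicit priority loop over state_order plus a separately filtered alphabetical sort with a single sorted() call over the whole set using a composite key (rank from a precomputed index dict, defaulting past the state labels, then the label itself).
import Mathlib
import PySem

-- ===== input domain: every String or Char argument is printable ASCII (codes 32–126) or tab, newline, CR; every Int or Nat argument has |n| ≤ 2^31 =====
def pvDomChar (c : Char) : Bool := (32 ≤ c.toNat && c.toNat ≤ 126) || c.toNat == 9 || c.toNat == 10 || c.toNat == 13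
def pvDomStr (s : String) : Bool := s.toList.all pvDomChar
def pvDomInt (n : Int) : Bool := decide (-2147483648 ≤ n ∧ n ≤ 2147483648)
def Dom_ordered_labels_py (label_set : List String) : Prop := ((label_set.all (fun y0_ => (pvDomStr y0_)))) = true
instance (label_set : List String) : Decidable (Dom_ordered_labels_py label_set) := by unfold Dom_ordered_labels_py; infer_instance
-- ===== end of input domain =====

-- B replaces A's explicit priority loop plus separate filtered sort by one composite-key sort
-- (a rank dict over the state labels, then sorted by (rank, label)); objective: simpler decomposition.


-- ===== PORT A =====
def pvPRIMARY : List String :=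
  ["needs:orchestrator", "orchestrator:running", "orchestrator:failed",
   "orchestrator:done", "orchestrator:dead"]

def pvPRIMARY_SET : PySem.Set String := PySem.Set.ofList pvPRIMARY

def pvHUMAN : String := "needs:human"

def ordered_labels_py (label_set : List String) : List String :=
  let state_order := pvPRIMARY ++ [pvHUMAN]
  let ordered := state_order.foldl
    (fun acc label => if label_set.contains label then acc ++ [label] else acc) []
  let non_state := PySem.List.sorted
    (label_set.filter (fun label => !(PySem.Set.contains pvPRIMARY_SET label) && !(label == pvHUMAN)))
    (fun x => x)
  ordered ++ non_state

-- ===== PORT B =====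
def ordered_labels_py_alt (label_set : List String) : List String :=
  let state_order := pvPRIMARY ++ [pvHUMAN]
  let rank : PySem.Dict String Int :=
    (PySem.List.enumerate state_order).foldl (fun d p => d.insert p.2 p.1) PySem.Dict.empty
  PySem.List.sorted2 label_set
    (fun label => rank.getD label (state_order.length : Int)) (fun label => label)

-- ===== PRECONDITION & SPEC =====
-- Python's argument is a SET of strings; per the type convention it is a list of DISTINCT
-- elements, so Pre_ only states that set invariant (no input a caller of A can form is excluded).
def Pre_ordered_labels_py (label_set : List String) : Prop := label_set.Nodup

instance (label_set : List String) : Decidable (Pre_ordered_labels_py label_set) := by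
  unfold Pre_ordered_labels_py; infer_instance

def pvWitness_ordered_labels_py : List String :=
  ["bug", "needs:human", "needs:orchestrator", "aaa"]

def Spec_ordered_labels_py (label_set : List String) (out : List String) : Prop := out = ordered_labels_py_alt label_set
instance (label_set : List String) (out : List String) : Decidable (Spec_ordered_labels_py label_set out) := by unfold Spec_ordered_labels_py; infer_instance

-- ===== CLAIM (what is proved, stated in full; the proofs are below) =====
def Claim_equal_ordered_labels_py : Prop := ∀ (label_set : List String), Dom_ordered_labels_py label_set → Pre_ordered_labels_py label_set → Spec_ordered_labels_py label_set (ordered_labels_py label_set)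

-- ===== LEMMAS AND PROOFS =====

-- sorted2 with keys into linear orders is sorted by the lexicographic composite key.
theorem pv_sorted2_eq_sorted_lex {α κ₁ κ₂ : Type} [LinearOrder κ₁] [LinearOrder κ₂]
    (xs : List α) (k1 : α → κ₁) (k2 : α → κ₂) :
    PySem.List.sorted2 xs k1 k2 = PySem.List.sorted xs (fun x => toLex (k1 x, k2 x)) := by
  unfold PySem.List.sorted2 PySem.List.sorted
  have h : (fun a b => decide (k1 a < k1 b) || (!decide (k1 b < k1 a) && decide (k2 a < k2 b)))
      = (fun a b : α => decide (toLex (k1 a, k2 a) < toLex (k1 b, k2 b))) := by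
    funext a b
    rcases lt_trichotomy (k1 a) (k1 b) with h1 | h1 | h1
    · simp [h1, Prod.Lex.lt_iff]
    · simp [h1, Prod.Lex.lt_iff]
    · simp [h1, not_lt.mpr h1.le, Prod.Lex.lt_iff, h1.ne']
  simp only [Bool.false_eq_true, reduceIte, h]

-- the state order, named once for the proofs
def pvSO : List String := pvPRIMARY ++ [pvHUMAN]

-- B's rank key, as a named function
def pvK1 (l : String) : Int :=
  PySem.Dict.getD
    ((PySem.List.enumerate pvSO).foldl (fun d p => d.insert p.2 p.1) PySem.Dict.empty)
    l (pvSO.length : Int)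

theorem pvK1_of_not_mem {l : String} (h : l ∉ pvSO) : pvK1 l = 6 := by
  simp [pvSO, pvPRIMARY, pvHUMAN] at h
  obtain ⟨h1, h2, h3, h4, h5, h6⟩ := h
  have c1 : ("needs:orchestrator" == l) = false := by simp [Ne.symm h1]
  have c2 : ("orchestrator:running" == l) = false := by simp [Ne.symm h2]
  have c3 : ("orchestrator:failed" == l) = false := by simp [Ne.symm h3]
  have c4 : ("orchestrator:done" == l) = false := by simp [Ne.symm h4]
  have c5 : ("orchestrator:dead" == l) = false := by simp [Ne.symm h5]
  have c6 : ("needs:human" == l) = false := by simp [Ne.symm h6]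
  simp [pvK1, pvSO, pvPRIMARY, pvHUMAN, PySem.List.enumerate, PySem.Dict.empty,
    PySem.Dict.insert, PySem.Dict.getD, PySem.Dict.get?, List.find?, c1, c2, c3, c4, c5, c6]

-- A's non-state test is exactly "not a state label"
theorem pv_q_iff (x : String) :
    ((!(PySem.Set.contains pvPRIMARY_SET x) && !(x == pvHUMAN)) = true) ↔ x ∉ pvSO := by
  have hps : pvPRIMARY_SET = pvPRIMARY := by decide
  simp [hps, PySem.Set.contains, pvSO, List.contains_eq_mem, pvPRIMARY, pvHUMAN]
  tauto

theorem pv_main (ls : List String) (hpre : ls.Nodup) :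
    ordered_labels_py ls = ordered_labels_py_alt ls := by
  unfold ordered_labels_py ordered_labels_py_alt
  simp only [PySem.List.foldl_append_if_eq_filter, List.nil_append]
  rw [pv_sorted2_eq_sorted_lex]
  set q : String → Bool :=
    fun label => !(PySem.Set.contains pvPRIMARY_SET label) && !(label == pvHUMAN) with hq
  have hkey : (fun x : String =>
        toLex ((PySem.Dict.getD
          ((PySem.List.enumerate (pvPRIMARY ++ [pvHUMAN])).foldl (fun d p => d.insert p.2 p.1)
            PySem.Dict.empty) x ((pvPRIMARY ++ [pvHUMAN]).length : Int)), x))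
      = (fun x : String => toLex (pvK1 x, x)) := rfl
  rw [hkey]
  set P := (pvPRIMARY ++ [pvHUMAN]).filter (fun label => ls.contains label) with hP
  set S := PySem.List.sorted (ls.filter q) (fun x => x) with hS
  have hsp : S.Perm (ls.filter q) := PySem.List.sorted_perm _ _ _
  have hPSO : P.Perm (ls.filter (fun l => (pvPRIMARY ++ [pvHUMAN]).contains l)) := by
    rw [List.perm_ext_iff_of_nodup ((by decide : (pvPRIMARY ++ [pvHUMAN]).Nodup).filter _)
      (hpre.filter _)]
    intro a
    simp only [List.mem_filter, List.contains_eq_mem, decide_eq_true_eq]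
    tauto
  have hq' : ls.filter q = ls.filter (fun l => !((pvPRIMARY ++ [pvHUMAN]).contains l)) := by
    apply List.filter_congr
    intro x _
    rw [Bool.eq_iff_iff, pv_q_iff]
    simp [List.contains_eq_mem, pvSO]
  have hperm : (P ++ S).Perm ls := by
    refine (List.Perm.append_left P hsp).trans ?_
    rw [hq']
    exact (hPSO.append_right _).trans (List.filter_append_perm _ ls)
  have hpair : (P ++ S).Pairwise (fun a b => toLex (pvK1 a, a) < toLex (pvK1 b, b)) := by
    rw [List.pairwise_append]
    refine ⟨?_, ?_, ?_⟩
    · exact List.Pairwise.sublist (List.filter_sublist)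
        (by decide : (pvPRIMARY ++ [pvHUMAN]).Pairwise
          (fun a b => toLex (pvK1 a, a) < toLex (pvK1 b, b)))
    · have h1 : S.Pairwise (fun a b : String => a ≤ b) := PySem.List.sorted_pairwise _ _
      have h2 : S.Pairwise (fun a b : String => a ≠ b) :=
        ((PySem.List.sorted_perm _ _ _).nodup_iff.mpr (hpre.filter _))
      refine (h1.and h2).imp_of_mem ?_
      intro a b ha hb hab
      have hqa : a ∉ pvSO := by
        rw [hS, PySem.List.mem_sorted, List.mem_filter] at ha
        exact (pv_q_iff a).mp ha.2
      have hqb : b ∉ pvSO := by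
        rw [hS, PySem.List.mem_sorted, List.mem_filter] at hb
        exact (pv_q_iff b).mp hb.2
      rw [Prod.Lex.lt_iff]
      simp only [ofLex_toLex]
      right
      exact ⟨by rw [pvK1_of_not_mem hqa, pvK1_of_not_mem hqb], lt_of_le_of_ne hab.1 hab.2⟩
    · intro a ha b hb
      have hqb : b ∉ pvSO := by
        rw [hS, PySem.List.mem_sorted, List.mem_filter] at hb
        exact (pv_q_iff b).mp hb.2
      have haso : a ∈ pvSO := by
        rw [hP, List.mem_filter] at ha; exact ha.1
      rw [Prod.Lex.lt_iff]
      simp only [ofLex_toLex]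
      left
      rw [pvK1_of_not_mem hqb]
      simp [pvSO, pvPRIMARY, pvHUMAN] at haso
      rcases haso with h | h | h | h | h | h <;> subst h <;> decide
  exact (PySem.List.sorted_eq_of_perm_of_pairwise_lt ls (P ++ S)
    (fun x => toLex (pvK1 x, x)) hperm hpair).symm

-- ===== VERDICT (by name: the statement is the Claim_ definition above) =====
theorem ordered_labels_py_spec : Claim_equal_ordered_labels_py := by
  intro label_set _ hpre
  exact pv_main label_set hpre
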